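-- pv_equiv track=rewrite | github.com/macleginn/exploring-clmd-divergences | src/compute_confusion_matrices.py | conll2graph
-- ===== SOURCE A (Python) =====
-- def conll2graph(record):
--     """
--     Converts sentences described using CoNLL-U format
--     (http://universaldependencies.org/format.html) to graphs.
--     Returns a dictionary of nodes (wordforms and POS tags indexed by line numbers)
--     together with a graph of the dependencies encoded as adjacency lists of (node_key,
--     relation_label, direction[up or down]) tuples.
--     """
--     graph = {}
--     nodes = {}
--     for line in record.splitlines():
--         if line.startswith('#'):
--             continue
--         fields = line.strip('\n').split('\t')
--         key = fields[0]
--         # Ignore compound surface keys for aux, du, etc.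
--         # Ignore hidden additional nodes for orphan handling
--         if '-' in key or '.' in key:
--             continue
--         wordform = fields[1]
--         pos = fields[3]
--         parent = fields[6]
--         relation = fields[7]
--         nodes[key] = {
--             'wordform': wordform,
--             'pos': pos,
--             'relation': relation,
--             'parent': parent
--         }
--         if key not in graph:
--             graph[key] = []
--         if parent not in graph:
--             graph[parent] = []
--         graph[key].append((parent, relation, 'up'))
--         graph[parent].append((key, relation, 'down'))
--     return (nodes, graph)
-- ===== SOURCE B (Python) =====
-- def conll2graph(record):
--     # Stage 1: parse the usable lines into a flat row list.
--     rows = []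
--     for line in record.splitlines():
--         if line.startswith('#'):
--             continue
--         fields = line.strip('\n').split('\t')
--         key = fields[0]
--         if '-' in key or '.' in key:
--             continue
--         rows.append((key, fields[1], fields[3], fields[6], fields[7]))
--     # Stage 2: node table by a dict comprehension over the rows.
--     nodes = {k: {'wordform': w, 'pos': p, 'relation': rel, 'parent': par}
--              for (k, w, p, par, rel) in rows}
--     # Stage 3: relational group-by — flatten each row into its two directed
--     # events, then build each adjacency list by scanning the event stream
--     # once per distinct endpoint (key order = first occurrence in the stream,
--     # which matches dict-insertion order of the incremental build).
--     events = [ev for (k, _w, _p, par, rel) in rows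
--               for ev in ((k, (par, rel, 'up')), (par, (k, rel, 'down')))]
--     graph = {k: [v for (k2, v) in events if k2 == k]
--              for k in dict.fromkeys(k for (k, _v) in events)}
--     return (nodes, graph)
-- ===== Notes on version B (the rewrite author's own statement) =====
-- stated objective: alternative
-- what changed: Replaces A's incremental dict mutation (per-line conditional key insertion plus in-place appends) with a relational formulation: parse rows, flatten each row into two directed edge events, and build the graph as a group-by comprehension that scans the event stream once per distinct endpoint (nodes by a dict comprehension).
import Mathlib
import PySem

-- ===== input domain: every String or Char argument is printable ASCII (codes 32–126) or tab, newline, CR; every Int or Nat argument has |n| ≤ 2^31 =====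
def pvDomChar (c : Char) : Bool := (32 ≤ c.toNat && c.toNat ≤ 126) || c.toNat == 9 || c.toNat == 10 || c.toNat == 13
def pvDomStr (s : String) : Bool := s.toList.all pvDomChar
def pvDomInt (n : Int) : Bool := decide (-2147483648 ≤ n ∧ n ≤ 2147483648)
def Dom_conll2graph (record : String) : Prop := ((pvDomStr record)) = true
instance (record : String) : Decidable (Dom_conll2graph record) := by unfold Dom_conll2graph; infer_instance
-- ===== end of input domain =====

-- B replaces A's incremental dict mutation with a relational pipeline (parse rows, flatten to
-- edge events, build the graph by a group-by over distinct endpoints); equal return values on Pre_.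

-- ===== PORT A =====
-- A: one loop over lines, updating the nodes dict and the graph dict together.
-- The loop body is named (pvLineStepA) only so its state type is written once.
-- The `| _, …` fallthrough is Python's IndexError path (a line with < 8 fields), excluded by Pre_.
def pvLineStepA
    (st : PySem.Dict String (List (String × String)) × PySem.Dict String (List (String × String × String)))
    (line : String) :
    PySem.Dict String (List (String × String)) × PySem.Dict String (List (String × String × String)) :=
  if PySem.Str.startswith line "#" then st
  else
    let fields := (PySem.Str.split? (PySem.Str.stripChars line "\n") "\t").getD []
    let key := fields.headD ""
    if PySem.Str.isIn "-" key || PySem.Str.isIn "." key then st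
    else
      match PySem.List.pyGet? fields 1, PySem.List.pyGet? fields 3,
            PySem.List.pyGet? fields 6, PySem.List.pyGet? fields 7 with
      | some wordform, some pos, some parent, some relation =>
          let nodes := st.1.insert key
            [("wordform", wordform), ("pos", pos), ("relation", relation), ("parent", parent)]
          let graph := if st.2.contains key then st.2 else st.2.insert key []
          let graph := if graph.contains parent then graph else graph.insert parent []
          let graph := graph.modify key [] (· ++ [(parent, relation, "up")])
          let graph := graph.modify parent [] (· ++ [(key, relation, "down")])
          (nodes, graph)
      | _, _, _, _ => st

def conll2graph (record : String) : (List (String × List (String × String))) × (List (String × List (String × String × String))) :=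
  let st := (PySem.Str.splitlines record).foldl pvLineStepA (PySem.Dict.empty, PySem.Dict.empty)
  (st.1.items, st.2.items)

-- ===== PORT B =====
-- B stage 1: the row-collecting loop (body named pvRowStepB; the `| _ => rows` fallthrough is
-- the IndexError path, outside Pre_).
def pvRowStepB
    (rows : List (String × String × String × String × String)) (line : String) :
    List (String × String × String × String × String) :=
  if PySem.Str.startswith line "#" then rows
  else
    let fields := (PySem.Str.split? (PySem.Str.stripChars line "\n") "\t").getD []
    let key := fields.headD ""
    if PySem.Str.isIn "-" key || PySem.Str.isIn "." key then rows
    else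
      match PySem.List.pyGet? fields 1, PySem.List.pyGet? fields 3,
            PySem.List.pyGet? fields 6, PySem.List.pyGet? fields 7 with
      | some wordform, some pos, some parent, some relation =>
          rows ++ [(key, wordform, pos, parent, relation)]
      | _, _, _, _ => rows

def pvRowsB (record : String) : List (String × String × String × String × String) :=
  (PySem.Str.splitlines record).foldl pvRowStepB []

-- B stage 3a: flatten each row into its two directed edge events.
def pvEventsB (rows : List (String × String × String × String × String)) :
    List (String × (String × String × String)) :=
  rows.flatMap (fun r =>
    [(r.1, (r.2.2.2.1, r.2.2.2.2, "up")), (r.2.2.2.1, (r.1, r.2.2.2.2, "down"))])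

def conll2graph_alt (record : String) : (List (String × List (String × String))) × (List (String × List (String × String × String))) :=
  let rows := pvRowsB record
  -- stage 2: dict comprehension over the rows (duplicate keys: first position, last value = Dict.insert)
  let nodes := rows.foldl
    (fun (d : PySem.Dict String (List (String × String))) r =>
      d.insert r.1 [("wordform", r.2.1), ("pos", r.2.2.1), ("relation", r.2.2.2.2), ("parent", r.2.2.2.1)])
    PySem.Dict.empty
  -- stage 3: group-by; dict.fromkeys = PySem.List.dedup, and a dict comprehension over
  -- DISTINCT keys has exactly this list as its items, so it is built as the list directly.
  let events := pvEventsB rows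
  let keys := PySem.List.dedup (events.map (·.1))
  let graph := keys.map (fun k => (k, (events.filter (fun e => e.1 == k)).map (·.2)))
  (nodes.items, graph)

-- ===== PRECONDITION & SPEC =====
-- Pre_ excludes records with a non-comment, non-compound/hidden-key line of fewer than 8 tab-separated
-- fields: Python A raises IndexError on such lines.
def Pre_conll2graph (record : String) : Prop :=
  ∀ line ∈ PySem.Str.splitlines record,
    PySem.Str.startswith line "#" = true ∨
    PySem.Str.isIn "-" (((PySem.Str.split? (PySem.Str.stripChars line "\n") "\t").getD []).headD "") = true ∨
    PySem.Str.isIn "." (((PySem.Str.split? (PySem.Str.stripChars line "\n") "\t").getD []).headD "") = true ∨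
    8 ≤ ((PySem.Str.split? (PySem.Str.stripChars line "\n") "\t").getD []).length
instance (record : String) : Decidable (Pre_conll2graph record) := by unfold Pre_conll2graph; infer_instance
def pvWitness_conll2graph : String := "1\tJohn\tJohn\tPROPN\t_\t_\t0\troot\n2\truns\trun\tVERB\t_\t_\t1\tnsubj"
def Spec_conll2graph (record : String) (out : (List (String × List (String × String))) × (List (String × List (String × String × String)))) : Prop := out = conll2graph_alt record
instance (record : String) (out : (List (String × List (String × String))) × (List (String × List (String × String × String)))) : Decidable (Spec_conll2graph record out) := by unfold Spec_conll2graph; infer_instance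

-- ===== CLAIM (what is proved, stated in full; the proofs are below) =====
def Claim_equal_conll2graph : Prop := ∀ (record : String), Dom_conll2graph record → Pre_conll2graph record → Spec_conll2graph record (conll2graph record)

-- ===== LEMMAS AND PROOFS =====

-- A's per-line node update, as a function of the parsed row
def pvNodeStep (d : PySem.Dict String (List (String × String)))
    (r : String × String × String × String × String) : PySem.Dict String (List (String × String)) :=
  d.insert r.1 [("wordform", r.2.1), ("pos", r.2.2.1), ("relation", r.2.2.2.2), ("parent", r.2.2.2.1)]

-- A's per-line graph update, as a function of the parsed row
def pvGraphStep (g : PySem.Dict String (List (String × String × String)))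
    (r : String × String × String × String × String) : PySem.Dict String (List (String × String × String)) :=
  let g := g.setdefault r.1 []
  let g := g.setdefault r.2.2.2.1 []
  let g := g.modify r.1 [] (· ++ [(r.2.2.2.1, r.2.2.2.2, "up")])
  g.modify r.2.2.2.1 [] (· ++ [(r.1, r.2.2.2.2, "down")])

-- the parse of one line, as a partial function (shared shape of both loop bodies)
def pvParseRow (line : String) : Option (String × String × String × String × String) :=
  if PySem.Str.startswith line "#" then none
  else
    let fields := (PySem.Str.split? (PySem.Str.stripChars line "\n") "\t").getD []
    let key := fields.headD ""
    if PySem.Str.isIn "-" key || PySem.Str.isIn "." key then none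
    else
      match PySem.List.pyGet? fields 1, PySem.List.pyGet? fields 3,
            PySem.List.pyGet? fields 6, PySem.List.pyGet? fields 7 with
      | some wordform, some pos, some parent, some relation =>
          some (key, wordform, pos, parent, relation)
      | _, _, _, _ => none

theorem pvSetdefault_eq {ν : Type} (d : PySem.Dict String ν) (k : String) (v : ν) :
    d.setdefault k v = if d.contains k then d else d.insert k v := by
  by_cases h : d.contains k = true
  · rw [PySem.Dict.setdefault_of_contains d v h, if_pos h]
  · rw [PySem.Dict.setdefault_of_not_contains d v (by simpa using h), if_neg h]

-- A's loop body equals the dispatch on pvParseRow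
theorem pvStepA_eq (line : String)
    (st : PySem.Dict String (List (String × String)) × PySem.Dict String (List (String × String × String))) :
    pvLineStepA st line
    = (match pvParseRow line with
       | none => st
       | some r => (pvNodeStep st.1 r, pvGraphStep st.2 r)) := by
  unfold pvLineStepA pvParseRow pvNodeStep pvGraphStep
  by_cases h1 : PySem.Str.startswith line "#" = true
  · rw [if_pos h1, if_pos h1]
  · rw [if_neg h1, if_neg h1]
    by_cases h2 : (PySem.Str.isIn "-" (((PySem.Str.split? (PySem.Str.stripChars line "\n") "\t").getD []).headD "") ||
                   PySem.Str.isIn "." (((PySem.Str.split? (PySem.Str.stripChars line "\n") "\t").getD []).headD "")) = true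
    · rw [if_pos h2, if_pos h2]
    · rw [if_neg h2, if_neg h2]
      rcases hf1 : PySem.List.pyGet? ((PySem.Str.split? (PySem.Str.stripChars line "\n") "\t").getD []) 1 with _ | w <;>
      rcases hf3 : PySem.List.pyGet? ((PySem.Str.split? (PySem.Str.stripChars line "\n") "\t").getD []) 3 with _ | p <;>
      rcases hf6 : PySem.List.pyGet? ((PySem.Str.split? (PySem.Str.stripChars line "\n") "\t").getD []) 6 with _ | pr <;>
      rcases hf7 : PySem.List.pyGet? ((PySem.Str.split? (PySem.Str.stripChars line "\n") "\t").getD []) 7 with _ | rl <;>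
        simp only [pvSetdefault_eq]

-- A's fused fold over the lines equals the two row-folds over the parsed rows.
theorem pvFused_eq (lines : List String)
    (n : PySem.Dict String (List (String × String)))
    (g : PySem.Dict String (List (String × String × String))) :
    lines.foldl pvLineStepA (n, g)
    = ((lines.filterMap pvParseRow).foldl pvNodeStep n,
       (lines.filterMap pvParseRow).foldl pvGraphStep g) := by
  induction lines generalizing n g with
  | nil => rfl
  | cons line rest ih =>
    simp only [List.foldl_cons, List.filterMap_cons]
    rw [pvStepA_eq line (n, g)]
    cases hp : pvParseRow line with
    | none => simp only [ih]
    | some r => simp only [List.foldl_cons, ih]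

-- B's loop body equals the dispatch on pvParseRow
theorem pvRowStepB_eq (rows : List (String × String × String × String × String)) (line : String) :
    pvRowStepB rows line
    = (match pvParseRow line with
       | none => rows
       | some r => rows ++ [r]) := by
  unfold pvRowStepB pvParseRow
  by_cases h1 : PySem.Str.startswith line "#" = true
  · rw [if_pos h1, if_pos h1]
  · rw [if_neg h1, if_neg h1]
    by_cases h2 : (PySem.Str.isIn "-" (((PySem.Str.split? (PySem.Str.stripChars line "\n") "\t").getD []).headD "") ||
                   PySem.Str.isIn "." (((PySem.Str.split? (PySem.Str.stripChars line "\n") "\t").getD []).headD "")) = true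
    · rw [if_pos h2, if_pos h2]
    · rw [if_neg h2, if_neg h2]
      rcases PySem.List.pyGet? ((PySem.Str.split? (PySem.Str.stripChars line "\n") "\t").getD []) 1 with _ | w <;>
      rcases PySem.List.pyGet? ((PySem.Str.split? (PySem.Str.stripChars line "\n") "\t").getD []) 3 with _ | p <;>
      rcases PySem.List.pyGet? ((PySem.Str.split? (PySem.Str.stripChars line "\n") "\t").getD []) 6 with _ | pr <;>
      rcases PySem.List.pyGet? ((PySem.Str.split? (PySem.Str.stripChars line "\n") "\t").getD []) 7 with _ | rl <;> rfl

-- B's row-collecting loop computes the filterMap of pvParseRow.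
theorem pvRowsB_eq (record : String) :
    pvRowsB record = (PySem.Str.splitlines record).filterMap pvParseRow := by
  unfold pvRowsB
  generalize PySem.Str.splitlines record = lines
  suffices h : ∀ acc : List (String × String × String × String × String),
      lines.foldl pvRowStepB acc = acc ++ lines.filterMap pvParseRow by
    exact (h []).trans (List.nil_append _)
  induction lines with
  | nil => intro acc; simp
  | cons line rest ih =>
    intro acc
    simp only [List.foldl_cons, List.filterMap_cons]
    rw [pvRowStepB_eq]
    cases hp : pvParseRow line with
    | none => rw [ih acc]
    | some r => rw [ih (acc ++ [r])]; simp

theorem pvSetdefault_getD (g : PySem.Dict String (List (String × String × String)))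
    (k c : String) :
    (g.setdefault k ([] : List (String × String × String))).getD c [] = g.getD c [] := by
  by_cases h : c = k
  · subst h; exact PySem.Dict.getD_setdefault_self g c [] []
  · rw [PySem.Dict.getD_eq_get?_getD, PySem.Dict.get?_setdefault_of_ne _ _ h,
        ← PySem.Dict.getD_eq_get?_getD]

-- Per-step getD of A's graph fold, written over the two events of the row.
theorem pvGraphStep_getD (g : PySem.Dict String (List (String × String × String)))
    (r : String × String × String × String × String) (c : String) :
    (pvGraphStep g r).getD c []
      = g.getD c []
        ++ ([(r.1, (r.2.2.2.1, r.2.2.2.2, "up")), (r.2.2.2.1, (r.1, r.2.2.2.2, "down"))].filter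
              (fun e => e.1 == c)).map (·.2) := by
  unfold pvGraphStep
  rcases r with ⟨k, w, p, par, rel⟩
  simp only
  rw [PySem.Dict.getD_modify]
  by_cases hpar : c = par
  · subst hpar
    rw [if_pos rfl, PySem.Dict.getD_modify]
    by_cases hk : c = k
    · subst hk
      simp [pvSetdefault_getD]
    · rw [if_neg hk]
      simp [pvSetdefault_getD, Ne.symm hk]
  · rw [if_neg hpar, PySem.Dict.getD_modify]
    by_cases hk : c = k
    · subst hk
      rw [if_pos rfl]
      simp [pvSetdefault_getD, Ne.symm hpar]
    · rw [if_neg hk]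
      simp [pvSetdefault_getD, Ne.symm hk, Ne.symm hpar]

-- getD of the whole graph fold = the group-by scan of the event stream.
theorem pvGraphFold_getD (rows : List (String × String × String × String × String))
    (g : PySem.Dict String (List (String × String × String))) (c : String) :
    (rows.foldl pvGraphStep g).getD c []
      = g.getD c [] ++ ((pvEventsB rows).filter (fun e => e.1 == c)).map (·.2) := by
  induction rows generalizing g with
  | nil => simp [pvEventsB]
  | cons r rest ih =>
    simp only [List.foldl_cons, pvEventsB, List.flatMap_cons, List.filter_append,
      List.map_append, ← List.append_assoc]
    rw [ih, pvGraphStep_getD]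
    rfl

-- setdefault with [] adds the key to the key set.
theorem pvKeys_setdefault (d : PySem.Dict String (List (String × String × String))) (k : String) :
    (d.setdefault k ([] : List (String × String × String))).keys = PySem.Set.add d.keys k := by
  rw [PySem.Dict.keys_setdefault]
  simp [PySem.Set.add, PySem.Set.contains, PySem.Dict.contains_eq_decide_mem_keys]

-- Per-step keys of A's graph fold.
theorem pvGraphStep_keys (g : PySem.Dict String (List (String × String × String)))
    (r : String × String × String × String × String) :
    (pvGraphStep g r).keys = PySem.Set.update g.keys [r.1, r.2.2.2.1] := by
  unfold pvGraphStep
  rcases r with ⟨k, w, p, par, rel⟩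
  simp only
  have h1 : ((g.setdefault k []).setdefault par []).contains k = true := by
    by_cases h : k = par <;> simp [PySem.Dict.contains_setdefault, h]
  have h2 : (((g.setdefault k []).setdefault par []).modify k []
      (· ++ [(par, rel, "up")])).contains par = true := by
    simp [PySem.Dict.contains_modify, PySem.Dict.contains_setdefault]
  rw [PySem.Dict.keys_modify, PySem.Dict.keys_insert_of_contains _ _ h2,
      PySem.Dict.keys_modify, PySem.Dict.keys_insert_of_contains _ _ h1,
      pvKeys_setdefault, pvKeys_setdefault]
  rfl

-- keys of the whole graph fold.
theorem pvGraphFold_keys (rows : List (String × String × String × String × String))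
    (g : PySem.Dict String (List (String × String × String))) :
    (rows.foldl pvGraphStep g).keys = PySem.Set.update g.keys ((pvEventsB rows).map (·.1)) := by
  induction rows generalizing g with
  | nil => simp [pvEventsB, PySem.Set.update]
  | cons r rest ih =>
    simp only [List.foldl_cons, pvEventsB, List.flatMap_cons, List.map_append]
    rw [ih, pvGraphStep_keys, PySem.Set.update_append]
    rfl

-- ===== VERDICT (by name: the statement is the Claim_ definition above) =====
theorem conll2graph_spec : Claim_equal_conll2graph := by
  intro record _ _
  unfold Spec_conll2graph conll2graph conll2graph_alt
  rw [pvFused_eq, pvRowsB_eq]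
  set rows := (PySem.Str.splitlines record).filterMap pvParseRow with hrows
  simp only
  refine congrArg₂ Prod.mk rfl ?_
  -- graph side
  have hkeys : (rows.foldl pvGraphStep PySem.Dict.empty).keys
      = PySem.Set.ofList ((pvEventsB rows).map (·.1)) := by
    rw [pvGraphFold_keys]
    simp [PySem.Dict.keys_empty, PySem.Set.update_nil_left]
  have hnodup : (rows.foldl pvGraphStep PySem.Dict.empty).keys.Nodup := by
    rw [hkeys]; exact PySem.Set.nodup_ofList _
  rw [PySem.Dict.items_eq_map_keys _ hnodup []]
  rw [hkeys]
  have hded : PySem.List.dedup ((pvEventsB rows).map (·.1))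
      = PySem.Set.ofList ((pvEventsB rows).map (·.1)) := rfl
  rw [hded]
  apply List.map_congr_left
  intro k _
  rw [pvGraphFold_getD]
  simp
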